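-- pv_equiv track=rewrite | github.com/seodangdogProject/seodangdog | seodangdogml/src/repository/news_repository.py | get_unique_news
-- ===== SOURCE A (Python) =====
-- def get_unique_news(news_data):
--     deleted_news_index = []
--
--     for i in range(len(news_data)):
--         if i in deleted_news_index: continue
--         target_news = news_data[i]
--         for j in range(len(news_data)):
--             if(i==j): continue
--             compare_news = news_data[j]
--             if(len(set(target_news["newsKeyword"].keys()) & set(compare_news["newsKeyword"].keys())) >= 10):
--                 deleted_news_index.append(j)
--
--     news_data = [news for i, news in enumerate(news_data) if i not in deleted_news_index]
--     return news_data
-- ===== SOURCE B (Python) =====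
-- def get_unique_news(news_data):
--     # Single forward pass: keep an item iff it shares < 10 keywords with every
--     # already-kept item.  With fewer than two items there is nothing to compare.
--     if len(news_data) <= 1:
--         return news_data
--     survivors = []
--     result = []
--     for news in news_data:
--         ks = set(news["newsKeyword"].keys())
--         if all(len(ks & sk) < 10 for sk in survivors):
--             survivors.append(ks)
--             result.append(news)
--     return result
-- ===== Notes on version B (the rewrite author's own statement) =====
-- stated objective: simpler
-- what changed: A runs an all-pairs index loop collecting a deleted-index list (scanned for every membership test) and then filters by index; B does one forward pass that keeps an item iff it shares fewer than 10 keywords with every already-kept item, which selects the same items because keyword overlap is symmetric.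
import Mathlib
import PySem

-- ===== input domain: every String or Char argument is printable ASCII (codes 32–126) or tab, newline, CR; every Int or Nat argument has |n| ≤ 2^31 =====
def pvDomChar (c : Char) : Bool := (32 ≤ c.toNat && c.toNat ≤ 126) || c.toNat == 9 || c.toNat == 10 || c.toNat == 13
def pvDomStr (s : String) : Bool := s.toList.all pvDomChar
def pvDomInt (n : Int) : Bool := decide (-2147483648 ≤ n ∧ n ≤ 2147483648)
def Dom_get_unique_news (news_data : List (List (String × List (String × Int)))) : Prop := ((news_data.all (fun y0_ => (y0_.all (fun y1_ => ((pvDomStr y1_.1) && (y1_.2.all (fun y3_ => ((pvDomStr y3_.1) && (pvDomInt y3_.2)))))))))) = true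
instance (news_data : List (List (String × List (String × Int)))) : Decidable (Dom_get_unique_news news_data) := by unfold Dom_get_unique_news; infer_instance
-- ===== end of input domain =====

-- B replaces A's all-pairs deleted-index loop by one forward pass over the items that keeps
-- an item iff it shares fewer than 10 keywords with every already-kept item (objective: simpler).

-- ===== PORT A =====
-- set(news["newsKeyword"].keys()); the .getD [] only fires where Python raises KeyError (outside Pre_)
def pvKeysA (news : List (String × List (String × Int))) : PySem.Set String :=
  PySem.Set.ofList ((((PySem.Dict.mk news).get? "newsKeyword").getD []).map Prod.fst)

def get_unique_news (news_data : List (List (String × List (String × Int)))) : List (List (String × List (String × Int))) :=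
  let deleted_news_index : List Int :=
    (PySem.List.pyRange 0 (PySem.List.len news_data) 1).foldl
      (fun deleted i =>
        if deleted.contains i then deleted
        else
          let target_news := PySem.List.pyGetD news_data i []
          (PySem.List.pyRange 0 (PySem.List.len news_data) 1).foldl
            (fun deleted2 j =>
              if i = j then deleted2
              else
                let compare_news := PySem.List.pyGetD news_data j []
                if 10 ≤ PySem.Set.len (PySem.Set.inter (pvKeysA target_news) (pvKeysA compare_news))
                then deleted2 ++ [j] else deleted2)
            deleted)
      []
  ((PySem.List.enumerate news_data).filter (fun p => !(deleted_news_index.contains p.1))).map Prod.snd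

-- ===== PORT B =====
-- Source B's `set(news["newsKeyword"].keys())` is the same expression A evaluates: reuse pvKeysA
def pvStepB (st : List (PySem.Set String) × List (List (String × List (String × Int))))
    (news : List (String × List (String × Int))) :
    List (PySem.Set String) × List (List (String × List (String × Int))) :=
  let ks := pvKeysA news
  if st.1.all (fun sk => PySem.Set.len (PySem.Set.inter ks sk) < 10)
  then (st.1 ++ [ks], st.2 ++ [news])
  else st

def get_unique_news_alt (news_data : List (List (String × List (String × Int)))) : List (List (String × List (String × Int))) :=
  if news_data.length ≤ 1 then news_data
  else (news_data.foldl pvStepB ([], [])).2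

-- ===== PRECONDITION & SPEC =====
-- Pre_ excludes inputs with at least two items where some item lacks the "newsKeyword" key:
-- there Python A raises KeyError (with a single item no comparison runs, so nothing is accessed).
def Pre_get_unique_news (news_data : List (List (String × List (String × Int)))) : Prop :=
  news_data.length ≤ 1 ∨ ∀ news ∈ news_data, "newsKeyword" ∈ news.map Prod.fst

instance (news_data : List (List (String × List (String × Int)))) : Decidable (Pre_get_unique_news news_data) := by
  unfold Pre_get_unique_news; infer_instance

def pvWitness_get_unique_news : (List (List (String × List (String × Int)))) :=
  [[("newsKeyword", [("kw", 1)])], [("newsKeyword", [("other", 2)])]]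

def Spec_get_unique_news (news_data : List (List (String × List (String × Int)))) (out : List (List (String × List (String × Int)))) : Prop := out = get_unique_news_alt news_data
instance (news_data : List (List (String × List (String × Int)))) (out : List (List (String × List (String × Int)))) : Decidable (Spec_get_unique_news news_data out) := by unfold Spec_get_unique_news; infer_instance

-- ===== CLAIM (what is proved, stated in full; the proofs are below) =====
def Claim_equal_get_unique_news : Prop := ∀ (news_data : List (List (String × List (String × Int)))), Dom_get_unique_news news_data → Pre_get_unique_news news_data → Spec_get_unique_news news_data (get_unique_news news_data)

-- ===== LEMMAS AND PROOFS =====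

abbrev pvNews := List (String × List (String × Int))

-- "the two items at indices k and m share at least 10 keywords"
def pvSim (nd : List pvNews) (k m : ℕ) : Bool :=
  10 ≤ PySem.Set.len (PySem.Set.inter (pvKeysA (nd.getD k [])) (pvKeysA (nd.getD m [])))

-- kept indices among [0, m): greedy forward selection
def pvKept (nd : List pvNews) : ℕ → List ℕ
  | 0 => []
  | m+1 => pvKept nd m ++ (if (pvKept nd m).all (fun k => !pvSim nd k m) then [m] else [])

def pvKeptB (nd : List pvNews) (m : ℕ) : Bool := (pvKept nd m).all (fun k => !pvSim nd k m)


-- symmetry of the overlap test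
lemma pvSim_comm (nd : List pvNews) (k m : ℕ) : pvSim nd k m = pvSim nd m k := by
  have h : ∀ (s t : List String), s.Nodup → t.Nodup →
      (s.filter (fun x => t.contains x)).length = (t.filter (fun x => s.contains x)).length := by
    intro s t hs ht
    rw [← List.toFinset_card_of_nodup (hs.filter _), ← List.toFinset_card_of_nodup (ht.filter _)]
    congr 1
    ext x; simp [and_comm]
  have hnd : ∀ x : pvNews, (pvKeysA x).Nodup := fun x => PySem.Set.nodup_ofList _
  simp only [pvSim, PySem.Set.len, PySem.Set.inter, PySem.Set.contains]
  simp only [h (pvKeysA (nd.getD k [])) (pvKeysA (nd.getD m [])) (hnd _) (hnd _)]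
  rfl

lemma pvKept_eq_filter (nd : List pvNews) (m : ℕ) :
    pvKept nd m = (List.range m).filter (pvKeptB nd) := by
  induction m with
  | zero => rfl
  | succ m ih =>
    have hf : List.filter (pvKeptB nd) [m]
        = if (pvKept nd m).all (fun k => !pvSim nd k m) then [m] else [] := by
      cases hall : (pvKept nd m).all (fun k => !pvSim nd k m) <;>
        simp [pvKeptB, hall]
    rw [pvKept, List.range_succ, List.filter_append, ← ih, hf]

lemma mem_pvKept (nd : List pvNews) (m k : ℕ) :
    k ∈ pvKept nd m ↔ k < m ∧ pvKeptB nd k = true := by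
  rw [pvKept_eq_filter]; simp [List.mem_filter, and_comm]

-- Int-indexed overlap test, as the inner loop of A computes it
def pvSimI (nd : List pvNews) (i j : Int) : Bool :=
  10 ≤ PySem.Set.len (PySem.Set.inter (pvKeysA (PySem.List.pyGetD nd i [])) (pvKeysA (PySem.List.pyGetD nd j [])))

lemma pvSimI_natCast (nd : List pvNews) (k m : ℕ) : pvSimI nd (k : Int) (m : Int) = pvSim nd k m := by
  simp [pvSimI, pvSim]

-- A's deleted_news_index after the first m outer iterations
def pvDel (nd : List pvNews) : ℕ → List Int
  | 0 => []
  | m+1 =>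
    let d := pvDel nd m
    if d.contains (m : Int) then d
    else d ++ (PySem.List.pyRange 0 (PySem.List.len nd) 1).filter
      (fun j => !((m : Int) == j) && pvSimI nd (m : Int) j)

lemma pvInner_eq (nd : List pvNews) (i : Int) (del : List Int) :
    (PySem.List.pyRange 0 (PySem.List.len nd) 1).foldl
      (fun deleted2 j =>
        if i = j then deleted2
        else if 10 ≤ PySem.Set.len (PySem.Set.inter (pvKeysA (PySem.List.pyGetD nd i []))
                     (pvKeysA (PySem.List.pyGetD nd j [])))
             then deleted2 ++ [j] else deleted2)
      del
    = del ++ (PySem.List.pyRange 0 (PySem.List.len nd) 1).filter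
        (fun j => !(i == j) && pvSimI nd i j) := by
  have hfun : (fun (deleted2 : List Int) j =>
        if i = j then deleted2
        else if 10 ≤ PySem.Set.len (PySem.Set.inter (pvKeysA (PySem.List.pyGetD nd i []))
                     (pvKeysA (PySem.List.pyGetD nd j [])))
             then deleted2 ++ [j] else deleted2)
      = (fun deleted2 j => if (!(i == j) && pvSimI nd i j) = true then deleted2 ++ [id j] else deleted2) := by
    funext d2 j
    by_cases h : i = j <;> simp [h, pvSimI]
  rw [hfun, PySem.List.foldl_append_if (fun j => !(i == j) && pvSimI nd i j) id]
  simp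

lemma pvDel_eq (nd : List pvNews) (m : ℕ) :
    (PySem.List.pyRange 0 (m : Int) 1).foldl
      (fun deleted i =>
        if deleted.contains i then deleted
        else (PySem.List.pyRange 0 (PySem.List.len nd) 1).foldl
          (fun deleted2 j =>
            if i = j then deleted2
            else if 10 ≤ PySem.Set.len (PySem.Set.inter (pvKeysA (PySem.List.pyGetD nd i []))
                         (pvKeysA (PySem.List.pyGetD nd j [])))
                 then deleted2 ++ [j] else deleted2)
          deleted)
      []
    = pvDel nd m := by
  induction m with
  | zero => simp [PySem.List.pyRange_one_eq_nil, pvDel]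
  | succ m ih =>
    have hcast : ((m+1 : ℕ) : Int) = (m : Int) + 1 := by push_cast; ring
    rw [hcast, PySem.List.pyRange_one_succ_right (by positivity), List.foldl_append, ih]
    simp only [List.foldl_cons, List.foldl_nil]
    rw [pvInner_eq]
    simp only [pvDel]

lemma pvDel_mem (nd : List pvNews) : ∀ m : ℕ, m ≤ nd.length → ∀ j : Int, 0 ≤ j → j < (nd.length : Int) →
    (j ∈ pvDel nd m ↔ ∃ k : ℕ, k < m ∧ pvKeptB nd k = true ∧ (k : Int) ≠ j ∧ pvSim nd k j.toNat = true) := by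
  intro m
  induction m with
  | zero => intro _ j _ _; simp [pvDel]
  | succ m ih =>
    intro hm j hj0 hjn
    have hmn : m < nd.length := Nat.lt_of_succ_le hm
    have ihm := ih (Nat.le_of_succ_le hm)
    have hmle : (0:Int) ≤ (m : Int) := by positivity
    have hmlt : (m : Int) < (nd.length : Int) := by exact_mod_cast hmn
    simp only [pvDel]
    by_cases hc : (pvDel nd m).contains (m : Int) = true
    · rw [if_pos hc]
      have hcm : (m : Int) ∈ pvDel nd m := by
        simpa using hc
      have hmkept : pvKeptB nd m = false := by
        rcases (ihm (m : Int) hmle hmlt).mp hcm with ⟨k, hk, hkb, _, hsim⟩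
        rw [Int.toNat_natCast] at hsim
        by_contra hkb2
        have hall := List.all_eq_true.mp ((Bool.not_eq_false _).mp hkb2)
        have := hall k ((mem_pvKept nd m k).mpr ⟨hk, hkb⟩)
        simp [hsim] at this
      rw [ihm j hj0 hjn]
      constructor
      · rintro ⟨k, hk, rest⟩; exact ⟨k, Nat.lt_succ_of_lt hk, rest⟩
      · rintro ⟨k, hk, hkb, hne, hsim⟩
        rcases Nat.lt_succ_iff_lt_or_eq.mp hk with h | rfl
        · exact ⟨k, h, hkb, hne, hsim⟩
        · rw [hmkept] at hkb; cases hkb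
    · rw [if_neg hc]
      have hmkept : pvKeptB nd m = true := by
        rw [pvKeptB, List.all_eq_true]
        intro k hkmem
        rcases (mem_pvKept nd m k).mp hkmem with ⟨hkm, hkb⟩
        by_contra hns
        have hsim : pvSim nd k m = true := by simpa using hns
        apply hc
        simp only [List.contains_iff_mem]
        refine (ihm (m : Int) hmle hmlt).mpr ⟨k, hkm, hkb, ?_, ?_⟩
        · exact_mod_cast Nat.ne_of_lt hkm
        · rwa [Int.toNat_natCast]
      have hjcast : ((j.toNat : ℕ) : Int) = j := Int.toNat_of_nonneg hj0
      rw [List.mem_append, ihm j hj0 hjn]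
      have hsimIm : pvSimI nd (m : Int) j = pvSim nd m j.toNat := by
        conv_lhs => rw [← hjcast]
        rw [pvSimI_natCast]
      have hfilt : (j ∈ (PySem.List.pyRange 0 (PySem.List.len nd) 1).filter
            (fun j => !((m : Int) == j) && pvSimI nd (m : Int) j))
          ↔ ((m : Int) ≠ j ∧ pvSim nd m j.toNat = true) := by
        rw [List.mem_filter, PySem.List.mem_pyRange_one]
        simp only [PySem.List.len_eq, Bool.and_eq_true, Bool.not_eq_true', beq_eq_false_iff_ne,
          ne_eq, hsimIm]
        constructor
        · rintro ⟨_, hne, hsim⟩; exact ⟨hne, hsim⟩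
        · rintro ⟨hne, hsim⟩; exact ⟨⟨hj0, hjn⟩, hne, hsim⟩
      rw [hfilt]
      constructor
      · rintro (⟨k, hk, rest⟩ | ⟨hne, hsim⟩)
        · exact ⟨k, Nat.lt_succ_of_lt hk, rest⟩
        · exact ⟨m, Nat.lt_succ_self m, hmkept, hne, hsim⟩
      · rintro ⟨k, hk, hkb, hne, hsim⟩
        rcases Nat.lt_succ_iff_lt_or_eq.mp hk with h | rfl
        · exact Or.inl ⟨k, h, hkb, hne, hsim⟩
        · exact Or.inr ⟨hne, hsim⟩

-- the key equivalence: an index is ever deleted iff the greedy pass drops it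
lemma pvKE (nd : List pvNews) (k : ℕ) (hk : k < nd.length) :
    (∃ k' : ℕ, k' < nd.length ∧ pvKeptB nd k' = true ∧ (k' : Int) ≠ (k : Int) ∧ pvSim nd k' k = true)
      ↔ pvKeptB nd k = false := by
  constructor
  · rintro ⟨k', hk', hkb', hne, hsim⟩
    have hne' : k' ≠ k := by exact_mod_cast hne
    rcases Nat.lt_or_ge k' k with h | h
    · by_contra hkb2
      have hall := List.all_eq_true.mp ((Bool.not_eq_false _).mp hkb2)
      have := hall k' ((mem_pvKept nd k k').mpr ⟨h, hkb'⟩)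
      simp [hsim] at this
    · have hlt : k < k' := lt_of_le_of_ne h (Ne.symm hne')
      by_contra hkb2
      have hkb : pvKeptB nd k = true := (Bool.not_eq_false _).mp hkb2
      have hall := List.all_eq_true.mp hkb'
      have := hall k ((mem_pvKept nd k' k).mpr ⟨hlt, hkb⟩)
      rw [pvSim_comm] at hsim
      simp [hsim] at this
  · intro hkb
    have hex : ∃ k' ∈ pvKept nd k, pvSim nd k' k = true := by
      by_contra hne
      push Not at hne
      have hkt : pvKeptB nd k = true := List.all_eq_true.mpr (fun x hx => by
        cases hpv : pvSim nd x k
        · rfl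
        · exact absurd hpv (hne x hx))
      rw [hkt] at hkb; cases hkb
    rcases hex with ⟨k', hkmem, hsim⟩
    rcases (mem_pvKept nd k k').mp hkmem with ⟨hk'k, hkb'⟩
    exact ⟨k', hk'k.trans hk, hkb', by exact_mod_cast Nat.ne_of_lt hk'k, hsim⟩

lemma pvDel_eq' (nd : List pvNews) :
    (PySem.List.pyRange 0 (PySem.List.len nd) 1).foldl
      (fun deleted i =>
        if deleted.contains i then deleted
        else (PySem.List.pyRange 0 (PySem.List.len nd) 1).foldl
          (fun deleted2 j =>
            if i = j then deleted2
            else if 10 ≤ PySem.Set.len (PySem.Set.inter (pvKeysA (PySem.List.pyGetD nd i []))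
                         (pvKeysA (PySem.List.pyGetD nd j [])))
                 then deleted2 ++ [j] else deleted2)
          deleted)
      []
    = pvDel nd nd.length := by
  simpa only [PySem.List.len_eq] using pvDel_eq nd nd.length

lemma pvNotMem (nd : List pvNews) (k : ℕ) (hk : k < nd.length) :
    (!((pvDel nd nd.length).contains (k : Int))) = pvKeptB nd k := by
  have hmem := pvDel_mem nd nd.length le_rfl (k : Int) (by positivity) (by exact_mod_cast hk)
  simp only [Int.toNat_natCast] at hmem
  have hke := pvKE nd k hk
  cases hkb : pvKeptB nd k
  · have hin : (k : Int) ∈ pvDel nd nd.length := hmem.mpr (hke.mpr hkb)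
    simp [hin]
  · have hout : (k : Int) ∉ pvDel nd nd.length := by
      intro hmem2
      have := hke.mp (hmem.mp hmem2)
      rw [hkb] at this; cases this
    simp [hout]

lemma pvRange_cast (nd : List pvNews) :
    PySem.List.pyRange 0 (PySem.List.len nd) 1 = (List.range nd.length).map (Nat.cast : ℕ → ℤ) := by
  rw [PySem.List.len_eq, PySem.List.pyRange_one]
  simp only [Int.sub_zero, Int.toNat_natCast, zero_add]

-- A's result is the greedy selection
lemma pvA_eq (nd : List pvNews) :
    get_unique_news nd = ((List.range nd.length).filter (pvKeptB nd)).map (fun k => nd.getD k []) := by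
  simp only [get_unique_news]
  rw [pvDel_eq', PySem.List.enumerate_eq_map_pyRange nd [], pvRange_cast]
  rw [List.map_map, List.filter_map, List.map_map]
  have hpred : ∀ k ∈ List.range nd.length,
      ((fun p : Int × pvNews => !(pvDel nd nd.length).contains p.1)
        ∘ (fun j => (j, PySem.List.pyGetD nd j [])) ∘ (Nat.cast : ℕ → ℤ)) k = pvKeptB nd k := by
    intro k hk
    rw [List.mem_range] at hk
    exact pvNotMem nd k hk
  rw [List.filter_congr hpred]
  apply List.map_congr_left
  intro k hk
  rw [List.mem_filter, List.mem_range] at hk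
  simp

-- B's fold over the first m items produces the kept key-sets and kept items
lemma pvB_fold (nd : List pvNews) : ∀ m : ℕ, m ≤ nd.length →
    (nd.take m).foldl pvStepB ([], [])
      = ((pvKept nd m).map (fun k => pvKeysA (nd.getD k [])),
         (pvKept nd m).map (fun k => nd.getD k [])) := by
  intro m
  induction m with
  | zero => intro _; simp [pvKept]
  | succ m ih =>
    intro hm
    have hmn : m < nd.length := hm
    rw [List.take_add_one, List.getElem?_eq_getElem hmn]
    simp only [Option.toList_some]
    rw [List.foldl_append, ih (le_of_lt hmn)]
    simp only [List.foldl_cons, List.foldl_nil, pvStepB]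
    have hget : pvKeysA nd[m] = pvKeysA (nd.getD m []) := by
      rw [List.getD_eq_getElem nd [] hmn]
    rw [hget, List.all_map]
    have hfun : ((fun sk => decide (PySem.Set.len (PySem.Set.inter (pvKeysA (nd.getD m [])) sk) < 10)) ∘
          (fun k => pvKeysA (nd.getD k [])))
        = (fun k => !pvSim nd k m) := by
      funext k
      show decide (PySem.Set.len (PySem.Set.inter (pvKeysA (nd.getD m [])) (pvKeysA (nd.getD k []))) < 10)
          = !pvSim nd k m
      rw [pvSim_comm]
      simp only [pvSim]
      rw [← decide_not]
      exact decide_eq_decide.mpr (by omega)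
    rw [hfun]
    show (if pvKeptB nd m = true then _ else _) = _
    by_cases hkb : pvKeptB nd m = true
    · rw [if_pos hkb]
      have hkept : pvKept nd (m+1) = pvKept nd m ++ [m] := by
        rw [pvKept, if_pos (show ((pvKept nd m).all fun k => !pvSim nd k m) = true from hkb)]
      rw [hkept]
      simp [List.getElem?_eq_getElem hmn]
    · rw [if_neg hkb]
      have hkept : pvKept nd (m+1) = pvKept nd m := by
        rw [pvKept, if_neg (show ¬((pvKept nd m).all fun k => !pvSim nd k m) = true from hkb)]
        simp
      rw [hkept]

lemma pvB_fold_full (nd : List pvNews) :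
    nd.foldl pvStepB ([], [])
      = ((pvKept nd nd.length).map (fun k => pvKeysA (nd.getD k [])),
         (pvKept nd nd.length).map (fun k => nd.getD k [])) := by
  have h := pvB_fold nd nd.length le_rfl
  rwa [List.take_length] at h

-- B's result is the greedy selection too
lemma pvAlt_eq (nd : List pvNews) :
    get_unique_news_alt nd = ((List.range nd.length).filter (pvKeptB nd)).map (fun k => nd.getD k []) := by
  unfold get_unique_news_alt
  by_cases h : nd.length ≤ 1
  · rw [if_pos h]
    rcases nd with _ | ⟨x, _ | ⟨y, t⟩⟩
    · simp
    · simp [List.range_succ, pvKeptB, pvKept]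
    · simp at h
  · rw [if_neg h]
    rw [pvB_fold_full, pvKept_eq_filter]

-- ===== VERDICT (by name: the statement is the Claim_ definition above) =====
theorem get_unique_news_spec : Claim_equal_get_unique_news := by
  intro nd _ _
  unfold Spec_get_unique_news
  rw [pvA_eq, pvAlt_eq]
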